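-- pv_equiv track=rewrite | github.com/chumpblocckami/merchantscroll | src/analysis/poc_classification.py | get_best_matching_key
-- ===== SOURCE A (Python) =====
-- def get_best_matching_key(name_list, name_dict):
--     max_overlap = 1
--     best_key = "Rogue"
--
--     for key, value_names in name_dict.items():
--         overlap = len(set(name_list).intersection(value_names))
--         if overlap > max_overlap:
--             max_overlap = overlap
--             best_key = key
--     return best_key
-- ===== SOURCE B (Python) =====
-- def get_best_matching_key(name_list, name_dict):
--     # Inverted index: name -> keys whose value list contains that name.
--     index = {}
--     for key, value_names in name_dict.items():
--         for name in set(value_names):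
--             index.setdefault(name, []).append(key)
--     # Overlap table for every key in one pass over the distinct query names.
--     counts = {}
--     for name in set(name_list):
--         for key in index.get(name, ()):
--             counts[key] = counts.get(key, 0) + 1
--     # Same selection rule as before: first key whose overlap exceeds 1 and all earlier ones.
--     max_overlap = 1
--     best_key = "Rogue"
--     for key in name_dict:
--         overlap = counts.get(key, 0)
--         if overlap > max_overlap:
--             max_overlap = overlap
--             best_key = key
--     return best_key
-- ===== Notes on version B (the rewrite author's own statement) =====
-- stated objective: faster
-- what changed: Replaces the per-key rebuild of set(name_list) and set intersection with a precomputed inverted index (name -> keys) and a count table built in one pass over the distinct query names; the final selection loop only looks overlaps up.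
import Mathlib
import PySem

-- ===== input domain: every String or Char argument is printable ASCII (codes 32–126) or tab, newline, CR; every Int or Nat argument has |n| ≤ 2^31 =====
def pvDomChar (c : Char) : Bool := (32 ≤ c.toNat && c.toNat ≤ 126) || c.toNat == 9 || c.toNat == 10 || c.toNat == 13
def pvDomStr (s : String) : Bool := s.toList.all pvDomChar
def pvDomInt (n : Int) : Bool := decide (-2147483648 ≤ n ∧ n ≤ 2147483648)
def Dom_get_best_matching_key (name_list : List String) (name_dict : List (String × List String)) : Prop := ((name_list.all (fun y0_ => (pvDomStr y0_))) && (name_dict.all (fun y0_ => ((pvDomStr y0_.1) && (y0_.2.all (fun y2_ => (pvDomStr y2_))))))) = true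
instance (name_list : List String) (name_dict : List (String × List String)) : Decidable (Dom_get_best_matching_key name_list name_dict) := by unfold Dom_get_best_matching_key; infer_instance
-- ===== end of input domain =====

-- B replaces the per-key set intersection with an inverted index (name -> keys) and a
-- precomputed overlap table built in one pass over the distinct query names; same selection
-- rule, measurably faster on the generated timing inputs (objective: faster).

-- ===== PORT A =====
def get_best_matching_key (name_list : List String) (name_dict : List (String × List String)) : String :=
  -- overlap = len(set(name_list).intersection(value_names)); running (max_overlap, best_key)
  (name_dict.foldl (fun (st : Int × String) kv =>
      let overlap : Int := PySem.Set.len (PySem.Set.inter (PySem.Set.ofList name_list) kv.2)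
      if st.1 < overlap then (overlap, kv.1) else st) ((1 : Int), "Rogue")).2

-- ===== PORT B =====
def get_best_matching_key_alt (name_list : List String) (name_dict : List (String × List String)) : String :=
  -- index.setdefault(name, []).append(key)  ==  modify name [] (· ++ [key])
  let index : PySem.Dict String (List String) :=
    name_dict.foldl (fun idx kv =>
      (PySem.Set.ofList kv.2).foldl (fun idx name => idx.modify name [] (· ++ [kv.1])) idx)
      PySem.Dict.empty
  let counts : PySem.Dict String Int :=
    (PySem.Set.ofList name_list).foldl (fun c name =>
      (index.getD name []).foldl (fun c key => c.insert key (c.getD key 0 + 1)) c)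
      PySem.Dict.empty
  (name_dict.foldl (fun (st : Int × String) kv =>
      let overlap : Int := counts.getD kv.1 0
      if st.1 < overlap then (overlap, kv.1) else st) ((1 : Int), "Rogue")).2

-- ===== PRECONDITION & SPEC =====
-- Pre_ excludes association lists with duplicate keys: a Python dict cannot contain them,
-- so such lists encode no Python input of A (A scores each duplicate entry separately
-- while B aggregates per key; neither behaviour corresponds to any dict).
def Pre_get_best_matching_key (name_list : List String) (name_dict : List (String × List String)) : Prop :=
  (name_dict.map Prod.fst).Nodup

instance (name_list : List String) (name_dict : List (String × List String)) : Decidable (Pre_get_best_matching_key name_list name_dict) := by unfold Pre_get_best_matching_key; infer_instance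

def pvWitness_get_best_matching_key : List String × (List (String × List String)) :=
  (["a", "b"], [("x", ["a", "b"]), ("y", ["c"])])

def Spec_get_best_matching_key (name_list : List String) (name_dict : List (String × List String)) (out : String) : Prop := out = get_best_matching_key_alt name_list name_dict
instance (name_list : List String) (name_dict : List (String × List String)) (out : String) : Decidable (Spec_get_best_matching_key name_list name_dict out) := by unfold Spec_get_best_matching_key; infer_instance

-- ===== CLAIM (what is proved, stated in full; the proofs are below) =====
def Claim_equal_get_best_matching_key : Prop := ∀ (name_list : List String) (name_dict : List (String × List String)), Dom_get_best_matching_key name_list name_dict → Pre_get_best_matching_key name_list name_dict → Spec_get_best_matching_key name_list name_dict (get_best_matching_key name_list name_dict)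


-- ===== LEMMAS AND PROOFS =====

-- the (name, key) pairs the index loop inserts for one dict entry (proof helper)
def pvPairs (kv : String × List String) : List (String × String) :=
  (PySem.Set.ofList kv.2).map (fun n => (n, kv.1))


-- a nested loop is a loop over the flattened list
theorem pv_foldl_foldl_flatMap {α β γ : Type} (l : List α) (g : α → List β)
    (f : γ → β → γ) (d : γ) :
    l.foldl (fun d a => (g a).foldl f d) d = (l.flatMap g).foldl f d := by
  induction l generalizing d with
  | nil => rfl
  | cons a t ih => simp [List.foldl_append, ih]

theorem pv_index_getD (name_dict : List (String × List String)) (n : String) :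
    (name_dict.foldl (fun idx kv =>
        (PySem.Set.ofList kv.2).foldl (fun idx name => idx.modify name [] (· ++ [kv.1])) idx)
        (PySem.Dict.empty : PySem.Dict String (List String))).getD n []
      = ((name_dict.flatMap pvPairs).filter (fun p => p.1 == n)).map (fun p => p.2) := by
  have h1 : ∀ (idx : PySem.Dict String (List String)) (kv : String × List String),
      (PySem.Set.ofList kv.2).foldl (fun idx name => idx.modify name [] (· ++ [kv.1])) idx
        = (pvPairs kv).foldl (fun d p => d.modify p.1 [] (· ++ [p.2])) idx := by
    intro idx kv
    simp [pvPairs, List.foldl_map]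
  rw [PySem.List.foldl_congr_mem _ _
        (fun idx kv => (pvPairs kv).foldl (fun d p => d.modify p.1 [] (· ++ [p.2])) idx) _
        (by intro acc kv _; exact h1 acc kv),
      pv_foldl_foldl_flatMap, PySem.Dict.getD_foldl_modify_append]
  simp

-- one dict entry's contribution to the count of key k at query name n
theorem pv_head (key : String) (vals : List String) (n k : String) :
    (((pvPairs (key, vals)).filter (fun p => p.1 == n)).map (fun p => p.2)).count k
      = if key = k ∧ n ∈ vals then 1 else 0 := by
  simp only [pvPairs, List.filter_map, List.map_map, List.count_eq_countP, List.countP_map,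
    List.countP_filter, Function.comp]
  by_cases hk : key = k
  · subst hk
    simp only [beq_self_eq_true, Bool.true_and, true_and]
    by_cases hn : n ∈ vals
    · rw [if_pos hn]
      have h := List.count_eq_one_of_mem (PySem.Set.nodup_ofList (xs := vals))
        ((PySem.Set.mem_ofList vals n).2 hn)
      rw [List.count_eq_countP] at h
      exact h
    · rw [if_neg hn, List.countP_eq_zero]
      intro a ha
      have hne : a ≠ n := fun h => hn (h ▸ (PySem.Set.mem_ofList vals a).1 ha)
      simp [hne]
  · simp [hk]

theorem pv_count_flat (l : List (String × List String)) (n k : String) :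
    (((l.flatMap pvPairs).filter (fun p => p.1 == n)).map (fun p => p.2)).count k
      = l.countP (fun kv => decide (kv.1 = k) && decide (n ∈ kv.2)) := by
  induction l with
  | nil => rfl
  | cons kv t ih =>
    simp only [List.flatMap_cons, List.filter_append, List.map_append, List.count_append,
      List.countP_cons]
    rw [ih]
    have := pv_head kv.1 kv.2 n k
    rw [show ((kv.1, kv.2) : String × List String) = kv from rfl] at this
    rw [this]
    by_cases h1 : kv.1 = k <;> by_cases h2 : n ∈ kv.2 <;> simp [h1, h2] <;> omega

-- with unique keys, the total contribution of key k at name n is 1 iff n ∈ v for k's entry (k, v)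
theorem pv_countP_unique (l : List (String × List String))
    (hnd : (l.map Prod.fst).Nodup) (k : String) (v : List String)
    (hkv : (k, v) ∈ l) (n : String) :
    l.countP (fun kv => decide (kv.1 = k) && decide (n ∈ kv.2)) = if n ∈ v then 1 else 0 := by
  induction l with
  | nil => cases hkv
  | cons kv t ih =>
    simp only [List.map_cons, List.nodup_cons] at hnd
    rcases List.mem_cons.1 hkv with h | h
    · have hk0 : t.countP (fun kv => decide (kv.1 = k) && decide (n ∈ kv.2)) = 0 := by
        rw [List.countP_eq_zero]
        intro p hp
        have hk' : kv.1 = k := by rw [← h]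
        have : p.1 ≠ k := by
          intro hpk
          apply hnd.1
          have hm := List.mem_map_of_mem (f := Prod.fst) hp
          rw [hpk] at hm
          rw [hk']
          exact hm
        simp [this]
      rw [List.countP_cons, hk0, ← h]
      by_cases hn : n ∈ v <;> simp [hn]
    · have hk1 : kv.1 ≠ k := by
        intro hpk
        exact hnd.1 (hpk ▸ List.mem_map_of_mem h)
      rw [List.countP_cons, ih hnd.2 h]
      simp [hk1]

theorem pv_sum_ite (N : List String) (v : List String) :
    (N.map (fun n => if n ∈ v then 1 else 0)).sum
      = (N.filter (fun n => decide (n ∈ v))).length := by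
  induction N with
  | nil => rfl
  | cons n t ih => by_cases h : n ∈ v <;> simp [h, ih, Nat.add_comm]

-- the overlap table agrees with A's per-key intersection size
theorem pv_counts_getD (name_list : List String) (name_dict : List (String × List String))
    (hnd : (name_dict.map Prod.fst).Nodup) (k : String) (v : List String)
    (hkv : (k, v) ∈ name_dict) :
    ((PySem.Set.ofList name_list).foldl (fun c name =>
        (((name_dict.foldl (fun idx kv =>
            (PySem.Set.ofList kv.2).foldl (fun idx name => idx.modify name [] (· ++ [kv.1])) idx)
            (PySem.Dict.empty : PySem.Dict String (List String)))).getD name []).foldl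
          (fun c key => c.insert key (c.getD key 0 + 1)) c)
        (PySem.Dict.empty : PySem.Dict String Int)).getD k 0
      = PySem.Set.len (PySem.Set.inter (PySem.Set.ofList name_list) v) := by
  rw [pv_foldl_foldl_flatMap _ (fun name =>
        ((name_dict.foldl (fun idx kv =>
          (PySem.Set.ofList kv.2).foldl (fun idx name => idx.modify name [] (· ++ [kv.1])) idx)
          (PySem.Dict.empty : PySem.Dict String (List String)))).getD name []),
      PySem.Dict.getD_foldl_insert_add_one]
  simp only [pv_index_getD, PySem.Dict.getD_empty, zero_add]
  rw [List.count_flatMap]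
  have hpt : ∀ n : String, (List.count k ∘ fun n =>
      ((name_dict.flatMap pvPairs).filter (fun p => p.1 == n)).map (fun p => p.2)) n
      = if n ∈ v then 1 else 0 := by
    intro n
    simp only [Function.comp]
    rw [pv_count_flat, pv_countP_unique name_dict hnd k v hkv]
  rw [List.map_congr_left (fun n _ => hpt n), pv_sum_ite]
  simp [PySem.Set.len, PySem.Set.inter]

-- ===== VERDICT (by name: the statement is the Claim_ definition above) =====
theorem get_best_matching_key_spec : Claim_equal_get_best_matching_key := by
  intro name_list name_dict _ hpre
  unfold Spec_get_best_matching_key get_best_matching_key get_best_matching_key_alt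
  refine congrArg Prod.snd ?_
  apply PySem.List.foldl_congr_mem
  intro acc kv hmem
  have hkv : (kv.1, kv.2) ∈ name_dict := by simpa using hmem
  rw [pv_counts_getD name_list name_dict hpre kv.1 kv.2 hkv]
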